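/-
  THE CONTRACTS OF THE SANITIZER'S RUNTIME (c/asan_rt.c: 16 functions of the image, and the constructor gcc emitted) — STATEMENTS ONLY.

  Their machine-level proofs are the pilot units of the farm (WORKPLAN: A02 the check routines, A03 the poisoning routines and the
  constructor path). Here: one `Spec` (UserX/Contract.lean) per function, and the proposition "the function at this address satisfies
  it" (`Calls`), over a PARAMETER RECORD of addresses, because the image is re-linked:

      RtSymbols                the entry addresses of the 17 functions and of `__asan_report`; `.init_array`'s bounds
                               (generated from the .sym file: c/gen_symbols.py → Vorbis/Symbols.lean, `Vorbis.Symbols.rt`)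
      Runtime                  + the descriptor table the constructor passes to `__asan_register_globals`
                               (generated from GLOBALS.txt: c/gen_globals.py → Vorbis/Globals.lean)
      RuntimeContracts L μ I codeOK K R
                               the seventeen contracts in one structure: what a proof of an instrumented function assumes

  THE CHECK ROUTINES. `__asan_{load,store}K_noabort(rdi = a)`:
      K = 1, 2, 4, 8     THE FAST-PATH FORM `Asan.SmallCheck L μ I codeOK clob K entry` (Asan/Check.lean; = `User.CheckSpec` with the
                         obligation `AccSmall K mem a` = `Sealed mem ∧ AccessibleSmall mem a K`): entered with the return address on
                         the stack and the obligation, the routine returns into a `Checked` state — MEMORY UNCHANGED (`v.mem = u.mem`: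
                         the returning path has no store), zmm and MXCSR and DF unchanged, every general register kept except rsp and
                         `clob` = rax rdx (K = 1), rax rcx rdx (K = 2, 4, 8); no stack is used besides the return address's slot.
                         This is what `u_walk` applies at each of the 1,090 small check sites (one goal `check_<addr>`), and what the
                         eight routines' units PROVE. There is no `Calls` form of these eight.
      16                 `Calls … check16Spec`: pre `Accessible mem a 16` → returns; `push rbx`, `call range_bad`: writes 16 bytes of stack;
                         clobbers rax rdx rsi rdi
      storeN(a, n), loadN(a, n)
                         `Calls … checkNSpec`: pre `n = 0 ∨ Accessible mem a n` → returns; 32 bytes of stack; clobbers rax rdx rdi; rsi kept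
      range_bad(a, n)    n ≥ 1: returns rax = 0 if `Accessible mem a n`, else rax = 1; memory unchanged; clobbers rax rdx rdi
  WHY THE THREE RANGE ROUTINES KEEP THE `Calls` FORM: they push (`Checked.mem : v.mem = u.mem` is FALSE for them), they need stack room
  below the return address (`CheckSpec.call` offers only the slot itself), and `__asan_storeN_noabort`'s size is a run-time value in
  rsi. They have three call sites in the whole image (vorbis_init ×2, stb_vorbis_open_memory ×1): there the walker's general call rule
  (`Calls.use`) applies.
  `load` and `store` are byte-identical except for the constant passed to `__asan_report` on the failing path: one contract for both.
  THE NEGATIVE HALF (`checkSmall_tight` …) says the statement is tight: if the bytes are NOT accessible the routine reaches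
  `__asan_report`. It is needed by nobody (the theorem says no check ever fails); it is what makes "no check fires" MEAN something.

  THE POISONING ROUTINES are stated with the store sequences of Asan/Objects.lean: `v.mem = unpoisonMem u.mem a n` etc.; what that does
  to the invariant is `ShadowInv.unpoison` / `.poison` / `ShadowOK.register`, proved there once.

  Why `rsp` is in every clobber list: `RegsKept S u v` speaks of the registers outside `S`, and the `ret` moves rsp by 8
  (`Returned.rsp`). The direction flag and the MXCSR masks are part of `K.inv` (`abiInv`), which `Returned` carries.
-/
import Asan.Stack
import Asan.Check
import UserX.Contract
namespace Asan
open X86 X86.User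

/-! ### The parameter records -/

/-- The entry addresses of the runtime, and the bounds of `.init_array` (`nm`: vorbis_f.sym). -/
structure RtSymbols where
  /-- `__asan_report`: where a failed check jumps -/
  report : Word
  /-- `range_bad` (static) -/
  rangeBad : Word
  load1 : Word
  store1 : Word
  load2 : Word
  store2 : Word
  load4 : Word
  store4 : Word
  load8 : Word
  store8 : Word
  load16 : Word
  store16 : Word
  storeN : Word
  /-- `arena_unpoison` / `arena_poison`: the runtime's GENERIC unpoison / poison routines for a byte range (named after their first
  client, stb_vorbis' arena; the base's heap calls them for every chunk). The names stay: accepted proofs cite them. -/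
  arenaUnpoison : Word
  arenaPoison : Word
  registerGlobals : Word
  /-- `_sub_I_65535_1`: the one constructor gcc emitted -/
  ctor : Word
  runCtors : Word
  /-- `__init_array_start`, `__init_array_end` -/
  initArrayStart : Nat
  initArrayEnd : Nat

/-- The runtime of one image: its symbols, and the table of the registered globals (`.data..LASAN0`: `count` descriptors of 64 bytes). -/
structure Runtime where
  sym : RtSymbols
  /-- the address the constructor passes in rdi -/
  table : Nat
  /-- the descriptors, in table order (their number is what the constructor passes in rsi) -/
  descs : List GlobalDesc

/-- **The descriptor table is in memory**: descriptor `i` at `table + 64 i`; the runtime reads its first three quadwords. -/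
def DescsIn (mem : Mem) (table : Nat) (descs : List GlobalDesc) : Prop :=
  ∀ i (h : i < descs.length),
    mem.readLE (UInt64.ofNat (table + 64 * i)) 8 = descs[i].beg ∧
    mem.readLE (UInt64.ofNat (table + 64 * i + 8)) 8 = descs[i].size ∧
    mem.readLE (UInt64.ofNat (table + 64 * i + 16)) 8 = descs[i].sizeRz

/-- **`.init_array` is in memory**: one entry, the address of the constructor (`mem64[__init_array_start] = _sub_I_65535_1`). -/
def CtorIn (mem : Mem) (S : RtSymbols) : Prop :=
  S.initArrayEnd = S.initArrayStart + 8 ∧ UInt64.ofNat (mem.readLE (UInt64.ofNat S.initArrayStart) 8) = S.ctor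

/-- The footprint of a registration: the shadow of every slot. -/
def registerWrites (descs : List GlobalDesc) : List Span := descs.map (fun d => shadowSpan d.beg (d.beg + d.sizeRz))

/-! ### What the proofs of EVERY program's constructor, `run_ctors` and stub need

The store sequence of `__asan_register_globals` does not depend on what the memory holds, so it respects agreement on a window;
the descriptor table and `.init_array` are read in memories that differ from the one of the precondition by stack stores. (Until
this section existed each program's units `_sub_I_65535_1` and `run_ctors` carried private copies of these lemmas.) -/

/-- Two memories that agree on a window still agree on it after the SAME one-byte store to both (wherever the store goes). -/
theorem write_eqOn_both {lo hi : Nat} {m m' : Mem} (h : Mem.EqOn lo hi m m') (a : Word) (v : Byte) :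
    Mem.EqOn lo hi (m.write a v) (m'.write a v) := by
  intro x hx1 hx2
  by_cases e : a = x
  · subst e
    rw [Mem.read_write_same, Mem.read_write_same]
  · rw [Mem.read_write_other _ _ _ _ e, Mem.read_write_other _ _ _ _ e]
    exact h x hx1 hx2

/-- The same for the byte-fill loop of the runtime (`fillMem`: `k` one-byte stores). -/
theorem fillMem_eqOn_both {lo hi : Nat} {m m' : Mem} (h : Mem.EqOn lo hi m m') (g : Nat) (v : Byte) (k : Nat) :
    Mem.EqOn lo hi (fillMem m g v k) (fillMem m' g v k) := by
  induction k generalizing m m' g with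
  | zero => exact h
  | succ k ih =>
    simp only [fillMem]
    exact ih (write_eqOn_both h _ _) (g + 1)

/-- The same for the stores of one registration (`registerOne`: they do not depend on the memory's content). -/
theorem registerOne_eqOn_both {lo hi : Nat} {m m' : Mem} (h : Mem.EqOn lo hi m m') (d : GlobalDesc) :
    Mem.EqOn lo hi (registerOne m d) (registerOne m' d) := by
  unfold registerOne
  apply fillMem_eqOn_both
  by_cases e : (d.beg + d.size) % 8 = 0
  · rw [if_pos e, if_pos e]
    exact h
  · rw [if_neg e, if_neg e]
    exact write_eqOn_both h _ _

/-- **`registerMem` respects agreement on a window**: two memories with the same shadow have the same shadow after the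
registration. This turns the exact post of `__asan_register_globals` (`v.mem = registerMem s.mem descs`, `s` = the state after the
caller's push of the return address) into the constructor's post about the caller's entry memory. -/
theorem registerMem_eqOn {lo hi : Nat} {m m' : Mem} (h : Mem.EqOn lo hi m m') (ds : List GlobalDesc) :
    Mem.EqOn lo hi (registerMem m ds) (registerMem m' ds) := by
  induction ds generalizing m m' with
  | nil => exact h
  | cons d ds ih =>
    have e1 : registerMem m (d :: ds) = registerMem (registerOne m d) ds := rfl
    have e2 : registerMem m' (d :: ds) = registerMem (registerOne m' d) ds := rfl
    rw [e1, e2]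
    exact ih (registerOne_eqOn_both h d)

/-- **The descriptor table stays in memory** under stores that leave a range `[lo, hi)` around the table alone. -/
theorem DescsIn.of_eqOn {lo hi : Nat} {m m' : Mem} {table : Nat} {descs : List GlobalDesc} (hd : DescsIn m table descs)
    (h : Mem.EqOn lo hi m m') (hlo : lo ≤ table) (hhi : table + 64 * descs.length ≤ hi) (hmax : hi < 2 ^ 63) :
    DescsIn m' table descs := by
  intro i hi'
  obtain ⟨h1, h2, h3⟩ := hd i hi'
  have e1 : (UInt64.ofNat (table + 64 * i)).toNat = table + 64 * i := by
    rw [UInt64.toNat_ofNat']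
    omega
  have e2 : (UInt64.ofNat (table + 64 * i + 8)).toNat = table + 64 * i + 8 := by
    rw [UInt64.toNat_ofNat']
    omega
  have e3 : (UInt64.ofNat (table + 64 * i + 16)).toNat = table + 64 * i + 16 := by
    rw [UInt64.toNat_ofNat']
    omega
  refine ⟨?_, ?_, ?_⟩
  · rw [h.readLE _ 8 (by omega) (by omega) (by omega)]
    exact h1
  · rw [h.readLE _ 8 (by omega) (by omega) (by omega)]
    exact h2
  · rw [h.readLE _ 8 (by omega) (by omega) (by omega)]
    exact h3

/-- **The descriptor table survives a store outside a range `[lo, hi)` around it** (the `call`'s push of the return address: the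
table lies in the image's data, the push goes to the stack). -/
theorem DescsIn.writeLE_off {lo hi : Nat} {m : Mem} {table : Nat} {descs : List GlobalDesc} (hd : DescsIn m table descs)
    (a : Word) (k v : Nat) (hk : a.toNat + k < 2 ^ 64) (hoff : a.toNat + k ≤ lo ∨ hi ≤ a.toNat)
    (hlo : lo ≤ table) (hhi : table + 64 * descs.length ≤ hi) (hmax : hi < 2 ^ 63) :
    DescsIn (m.writeLE a k v) table descs :=
  hd.of_eqOn (Mem.EqOn.writeLE lo hi m a k v hk hoff) hlo hhi hmax

/-- **`.init_array` stays in memory** under stores that leave a range `[lo, hi)` around its one slot alone. -/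
theorem CtorIn.of_eqOn {lo hi : Nat} {m m' : Mem} {S : RtSymbols} (hc : CtorIn m S) (h : Mem.EqOn lo hi m m')
    (hlo : lo ≤ S.initArrayStart) (hhi : S.initArrayStart + 8 ≤ hi) (hmax : hi < 2 ^ 63) : CtorIn m' S := by
  obtain ⟨k1, k2⟩ := hc
  refine ⟨k1, ?_⟩
  have e : (UInt64.ofNat S.initArrayStart).toNat = S.initArrayStart := by
    rw [UInt64.toNat_ofNat']
    omega
  rw [h.readLE _ 8 (by omega) (by omega) (by omega)]
  exact k2

/-- **The footprint of a registration lies in the shadow of the image**, [C00000H, C40000H): below the shadow of the heap region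
and far from the stack. What `u_same` / `v_untouched` need about `registerWrites` of an abstract table; for a concrete table the
literal window list is `rfl` (`c/gen_globals.py --emit-window-lemmas`). -/
theorem registerWrites_shadow (descs : List GlobalDesc) (hok : ∀ d, d ∈ descs → d.OK) :
    ∀ w, w ∈ registerWrites descs → 0xC00000 ≤ w.lo ∧ w.hi ≤ 0xC40000 := by
  intro w hw
  unfold registerWrites at hw
  obtain ⟨d, hd, rfl⟩ := List.mem_map.mp hw
  obtain ⟨d1, d2, d3, d4, d5⟩ := hok d hd
  unfold shadowSpan
  simp only
  omega

/-! ### The check routines -/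

/-- What a routine keeps besides the callee-saved registers: every general register outside `clob`, all vector registers, MXCSR. -/
def Keeps (clob : List Reg) (u v : State) : Prop := RegsKept clob u v ∧ v.zmm = u.zmm ∧ v.mxcsr = u.mxcsr

/-- The registers `__asan_{load,store}1_noabort` may change, besides rsp and the flags: the clobber list of its `SmallCheck`. -/
abbrev clobSmall1 : List Reg := [.rax, .rdx]

/-- The registers `__asan_{load,store}{2,4,8}_noabort` may change, besides rsp and the flags. -/
abbrev clobSmall248 : List Reg := [.rax, .rcx, .rdx]

/-- The registers `__asan_{load,store}16_noabort` may change. -/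
def clob16 : List Reg := [.rax, .rdx, .rsi, .rdi, .rsp]

/-- The registers `__asan_storeN_noabort`, `__asan_loadN_noabort` and `range_bad` may change (`rsi`, the size, is kept). -/
def clobN : List Reg := [.rax, .rdx, .rdi, .rsp]

/-- **`__asan_load16_noabort` / `__asan_store16_noabort`**: `push rbx`, `call range_bad`: 16 bytes of stack. -/
def check16Spec : Spec where
  pre u := Accessible u.mem (u.reg .rdi).toNat 16
  post u v := Keeps clob16 u v
  frame := 16
  writes _ := []

/-- **`__asan_storeN_noabort(a, n)`** and its twin **`__asan_loadN_noabort(a, n)`** (gcc emits it for a struct copy: lodepng's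
`readChunk_iCCP`; it is no field of `RtSymbols`: a statement cites the base's label `ProgX.Base.L.__asan_loadN_noabort.entry`): returns at once for `n = 0`; else two pushes, `sub rsp, 8`, `call range_bad`: 32 bytes of stack. -/
def checkNSpec : Spec where
  pre u := (u.reg .rsi).toNat = 0 ∨ Accessible u.mem (u.reg .rdi).toNat (u.reg .rsi).toNat
  post u v := Keeps clobN u v
  frame := 32
  writes _ := []

/-- **`range_bad(a, n)`, n ≥ 1**: decides `Accessible`; a leaf without a frame; nothing written. -/
def rangeBadSpec : Spec where
  pre u := 1 ≤ (u.reg .rsi).toNat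
  post u v :=
    v.mem = u.mem ∧ Keeps clobN u v ∧ (v.reg .rax).toNat ≤ 1 ∧
    ((v.reg .rax).toNat = 0 ↔ Accessible u.mem (u.reg .rdi).toNat (u.reg .rsi).toNat)
  frame := 0
  writes _ := []

/-! ### The poisoning routines and the constructor path -/

/-- The registers `arena_unpoison` and `arena_poison` may change. -/
def clobArena : List Reg := [.rsi, .rdi, .rsp]

/-- The registers `__asan_register_globals` may change. -/
def clobRegister : List Reg := [.rax, .rcx, .rdx, .r8, .r9, .rsp]

/-- **`arena_unpoison(rdi = a, rsi = n)`**, `a` a multiple of 8, `[a, a + n)` in the data space (so `n`, a signed 64-bit number in C, is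
not negative): the memory afterwards is `unpoisonMem`. A leaf without a frame. -/
def arenaUnpoisonSpec : Spec where
  pre u := (u.reg .rdi).toNat % 8 = 0 ∧ 0x100000 ≤ (u.reg .rdi).toNat ∧ (u.reg .rdi).toNat + (u.reg .rsi).toNat ≤ 0xC00000
  post u v := v.mem = unpoisonMem u.mem (u.reg .rdi).toNat (u.reg .rsi).toNat ∧ Keeps clobArena u v
  frame := 0
  writes u := [shadowSpan (u.reg .rdi).toNat ((u.reg .rdi).toNat + (u.reg .rsi).toNat)]

/-- **`arena_poison(rdi = a, rsi = n)`**: every granule that meets `[a, a + n)` gets FAH; those granules lie in the data space. (NOT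
`a + n + 7 ≤ C00000H`, as CONTRACTS.md has it: `arena_temp_restore(f, L)` poisons up to the arena's last byte, `a + n = C00000H`.) -/
def arenaPoisonSpec : Spec where
  pre u := (u.reg .rdi).toNat % 8 = 0 ∧ 0x100000 ≤ (u.reg .rdi).toNat ∧ (u.reg .rdi).toNat + ((u.reg .rsi).toNat + 7) / 8 * 8 ≤ 0xC00000
  post u v := v.mem = poisonMem u.mem (u.reg .rdi).toNat (u.reg .rsi).toNat ∧ Keeps clobArena u v
  frame := 0
  writes u := [shadowSpan (u.reg .rdi).toNat ((u.reg .rdi).toNat + (u.reg .rsi).toNat)]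

/-- **`__asan_register_globals(rdi = table, rsi = count)`** for a table that is in memory and whose descriptors are sane. -/
def registerGlobalsSpec (R : Runtime) : Spec where
  pre u :=
    (u.reg .rdi).toNat = R.table ∧ (u.reg .rsi).toNat = R.descs.length ∧ DescsIn u.mem R.table R.descs ∧
    (∀ d, d ∈ R.descs → d.OK)
  post u v := v.mem = registerMem u.mem R.descs ∧ Keeps clobRegister u v
  frame := 0
  writes _ := registerWrites R.descs

/-- **`_sub_I_65535_1`**: `sub rsp, 8`, loads the two constants, `call __asan_register_globals`: 16 bytes of stack. Its stack stores are
not shadow stores, so the SHADOW afterwards is that of `registerMem`. -/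
def ctorSpec (R : Runtime) : Spec where
  pre u := DescsIn u.mem R.table R.descs ∧ (∀ d, d ∈ R.descs → d.OK)
  post u v := Mem.EqOn 0xC00000 0xE00000 (registerMem u.mem R.descs) v.mem
  frame := 16
  writes _ := registerWrites R.descs

/-- **`run_ctors`**: `push rbx`, one round of `call [rbx]` through `.init_array`: 8 + 8 + 16 = 32 bytes of stack. -/
def runCtorsSpec (R : Runtime) : Spec where
  pre u := CtorIn u.mem R.sym ∧ DescsIn u.mem R.table R.descs ∧ (∀ d, d ∈ R.descs → d.OK)
  post u v := Mem.EqOn 0xC00000 0xE00000 (registerMem u.mem R.descs) v.mem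
  frame := 32
  writes _ := registerWrites R.descs

/-! ### The statements -/

/-- **THE CONTRACTS OF THE RUNTIME**, for the image described by `R`: what the proof of every instrumented function assumes, and what
the pilot units prove. `codeOK` is "the image's code is in memory", the one premise of a `CheckSpec` about the code (for the
stb_vorbis image: `Vorbis.CodeOK u₀`, the text is as in the reference state). The clobber lists are written out: the walker reads
them as literal lists. -/
structure RuntimeContracts (L : Layout) (μ : Microarch) (I : State → Prop) (codeOK : Mem → Prop) (K : Conv) (R : Runtime) : Prop where
  rangeBad : Calls L μ I K R.sym.rangeBad rangeBadSpec
  load1 : SmallCheck L μ I codeOK [.rax, .rdx] 1 R.sym.load1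
  store1 : SmallCheck L μ I codeOK [.rax, .rdx] 1 R.sym.store1
  load2 : SmallCheck L μ I codeOK [.rax, .rcx, .rdx] 2 R.sym.load2
  store2 : SmallCheck L μ I codeOK [.rax, .rcx, .rdx] 2 R.sym.store2
  load4 : SmallCheck L μ I codeOK [.rax, .rcx, .rdx] 4 R.sym.load4
  store4 : SmallCheck L μ I codeOK [.rax, .rcx, .rdx] 4 R.sym.store4
  load8 : SmallCheck L μ I codeOK [.rax, .rcx, .rdx] 8 R.sym.load8
  store8 : SmallCheck L μ I codeOK [.rax, .rcx, .rdx] 8 R.sym.store8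
  load16 : Calls L μ I K R.sym.load16 check16Spec
  store16 : Calls L μ I K R.sym.store16 check16Spec
  storeN : Calls L μ I K R.sym.storeN checkNSpec
  arenaUnpoison : Calls L μ I K R.sym.arenaUnpoison arenaUnpoisonSpec
  arenaPoison : Calls L μ I K R.sym.arenaPoison arenaPoisonSpec
  registerGlobals : Calls L μ I K R.sym.registerGlobals (registerGlobalsSpec R)
  ctor : Calls L μ I K R.sym.ctor (ctorSpec R)
  runCtors : Calls L μ I K R.sym.runCtors (runCtorsSpec R)

/-! ### The negative half: the checks are tight (optional; used by no proof) -/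

/-- **A small check of bytes that are NOT accessible reaches `__asan_report`** (`sub rsp, 8 ; mov edx, … ; mov esi, K ; call`: 16 bytes of
stack). With the routine's `SmallCheck`: it returns IF AND ONLY IF `AccessibleSmall`. -/
def checkSmall_tight (L : Layout) (μ : Microarch) (I : State → Prop) (K : Conv) (report entry : Word) (n : Nat) : Prop :=
  ∀ (u : State) (ret : Word), AtEntry K entry 16 ret u → ¬ AccessibleSmall u.mem (u.reg .rdi).toNat n →
    ReachVia L μ I u (fun v => v.rip = report)

/-- The same for the 16-byte checks (`push rbx`, then a `call`: 16 bytes of stack on either path). -/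
def check16_tight (L : Layout) (μ : Microarch) (I : State → Prop) (K : Conv) (report entry : Word) : Prop :=
  ∀ (u : State) (ret : Word), AtEntry K entry 16 ret u → ¬ Accessible u.mem (u.reg .rdi).toNat 16 →
    ReachVia L μ I u (fun v => v.rip = report)

/-- The same for `__asan_storeN_noabort(a, n)`, `n ≠ 0` (32 bytes of stack). -/
def checkN_tight (L : Layout) (μ : Microarch) (I : State → Prop) (K : Conv) (report entry : Word) : Prop :=
  ∀ (u : State) (ret : Word), AtEntry K entry 32 ret u → (u.reg .rsi).toNat ≠ 0 →
    ¬ Accessible u.mem (u.reg .rdi).toNat (u.reg .rsi).toNat → ReachVia L μ I u (fun v => v.rip = report)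

/-! ### What a caller does with them -/

variable {L : Layout} {μ : Microarch} {I : State → Prop} {K : Conv}

/-- After a call whose footprint lies outside the shadow, the shadow layer holds as before (SH8 for a callee: `ShadowUntouched`). -/
theorem shadowUntouched_of_returned {s : Spec} {u v : State} {ret : Word} (h : Returned K s u ret v)
    (hd : ∀ w, w ∈ s.footprint u → w.hi ≤ 0xC00000 ∨ 0xE00000 ≤ w.lo) : ShadowUntouched u.mem v.mem := by
  apply h.eqOn 0xC00000 0xE00000
  intro w hw
  have := hd w hw
  omega

/-- **A CHECK SITE, K = 1, 2, 4, 8, by hand** (what `u_walk` does at a `call` to a routine with a `SmallCheck` in the context): the walk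
stands at the routine's entry `u` with `rdi = a`; the `n` bytes at `a` lie inside the live object `o`; it goes on from a `Checked` state:
same memory, same vector registers, every general register kept but rsp and `clob`. -/
theorem SmallCheck.site {codeOK : Mem → Prop} {entry : Word} {n : Nat} {clob : List Reg} {P : State → Prop}
    (hc : SmallCheck L μ I codeOK clob n entry) {u : State} (ret : Word) (hrip : u.rip = entry) (hcode : codeOK u.mem)
    (hsp : L.Has (u.reg .rsp) 8) (hret : UInt64.ofNat (u.mem.readLE (u.reg .rsp) 8) = ret) (hlt : ret < 0x40000000)
    (hsealed : Sealed u.mem) {o : Obj} (hcov : Covers o.Bytes u.mem) (h1 : o.base ≤ (u.reg .rdi).toNat)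
    (h2 : (u.reg .rdi).toNat + n ≤ o.base + o.size) (hn : 1 ≤ n)
    (hk : ∀ v, Checked clob u ret v → ReachVia L μ I v P) : ReachVia L μ I u P :=
  hc.use ret (u.reg .rdi) hrip hcode hsp hret hlt rfl ⟨hsealed, Obj.accSmall_of_obj hcov h1 h2 hn⟩ hk

end Asan
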